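-- pv_equiv track=rewrite | github.com/ppenpraze/foobar_challenge | level3/queue-to-do/solution.py | solution
-- ===== SOURCE A (Python) =====
-- def xor(n):
--  # returns XOR for 1 to n
--  if n == 0:
--      return(0)
--  r = (n-1) % 4
--  if r == 0:
--      return(n-1)
--  elif r == 1:
--      return(1)
--  elif r == 2:
--      return(n)
--  return(0)
--
-- def solution(start, length):
--     cur = start
--     total = 0
--     i = 0
--     while cur <= start+length**2-1:
--         total^=xor(cur)^xor(cur+length-i)
--         cur+=length
--         i+=1
--     return(total)
-- ===== SOURCE B (Python) =====
-- def solution(start, length):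
--     total = 0
--     for i in range(length):
--         lo = start + i * length
--         hi = lo + length - i
--         # XOR the row [lo, hi): each (even, odd) neighbour pair XORs to 1,
--         # so only unpaired boundary IDs contribute their own value
--         if lo & 1:
--             total ^= lo
--             lo += 1
--         if (hi - lo) & 1:
--             hi -= 1
--             total ^= hi
--         total ^= ((hi - lo) // 2) & 1
--     return total
-- ===== Notes on version B (the rewrite author's own statement) =====
-- stated objective: alternative
-- what changed: Replaces A's closed-form prefix-XOR helper (the piecewise (n-1)%4 formula combined per row) with a per-row pairing argument: each (even,odd) neighbour pair XORs to 1, so a row contributes only its unpaired boundary IDs plus the parity of its pair count.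
import Mathlib
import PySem

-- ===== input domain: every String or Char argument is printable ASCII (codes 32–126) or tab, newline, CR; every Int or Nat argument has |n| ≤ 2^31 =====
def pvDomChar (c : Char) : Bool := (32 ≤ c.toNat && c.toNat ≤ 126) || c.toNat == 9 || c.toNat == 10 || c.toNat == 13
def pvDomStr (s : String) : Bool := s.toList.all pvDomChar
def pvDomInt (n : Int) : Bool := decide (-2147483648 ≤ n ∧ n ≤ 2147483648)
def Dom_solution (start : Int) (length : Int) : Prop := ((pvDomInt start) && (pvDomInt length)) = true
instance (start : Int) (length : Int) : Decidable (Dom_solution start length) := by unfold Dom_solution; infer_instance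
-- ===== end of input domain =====

-- B replaces A's piecewise prefix-XOR helper by a per-row pairing argument: even/odd neighbour pairs XOR to 1, only boundary IDs and the pair-count parity contribute (alternative algorithm, same cost class).

-- ===== PORT A =====
-- helper `xor` of A (renamed: `xor` clashes with Bool.xor)
def pyXor (n : Int) : Int :=
  if n = 0 then 0
  else
    let r := PySem.Int.mod (n - 1) 4
    if r = 0 then n - 1
    else if r = 1 then 1
    else if r = 2 then n
    else 0

-- the while-loop of A; fuel only makes the recursion total (length.toNat + 1 steps
-- suffice for length ≥ 0, which Pre_ guarantees; the loop body is A's, step for step)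
def solutionLoop : Nat → Int → Int → Int → Int → Int → Int
  | 0, _, _, _, total, _ => total
  | fuel+1, start, length, cur, total, i =>
    if cur ≤ start + length ^ 2 - 1 then
      solutionLoop fuel start length (cur + length)
        (PySem.Int.bxor total (PySem.Int.bxor (pyXor cur) (pyXor (cur + length - i))))
        (i + 1)
    else total

def solution (start : Int) (length : Int) : Int :=
  solutionLoop (length.toNat + 1) start length start 0 0

-- ===== PORT B =====
-- one row [lo, hi) of B: even/odd neighbour pairs each XOR to 1, boundary IDs survive
def rowStep2 (total lo hi : Int) : Int :=
  if PySem.Int.band (hi - lo) 1 = 1 then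
    PySem.Int.bxor (PySem.Int.bxor total (hi - 1))
      (PySem.Int.band (PySem.Int.floordiv ((hi - 1) - lo) 2) 1)
  else
    PySem.Int.bxor total (PySem.Int.band (PySem.Int.floordiv (hi - lo) 2) 1)

def rowStep (total lo hi : Int) : Int :=
  if PySem.Int.band lo 1 = 1 then rowStep2 (PySem.Int.bxor total lo) (lo + 1) hi
  else rowStep2 total lo hi

def solution_alt (start : Int) (length : Int) : Int :=
  (PySem.List.pyRange 0 length 1).foldl
    (fun total i => rowStep total (start + i * length) (start + i * length + length - i)) 0

-- ===== PRECONDITION & SPEC =====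
-- Pre_ excludes length < 0, on which A's while-loop decrements cur forever and never returns.
def Pre_solution (start : Int) (length : Int) : Prop := 0 ≤ length
instance (start : Int) (length : Int) : Decidable (Pre_solution start length) := by unfold Pre_solution; infer_instance
def pvWitness_solution : Int × Int := (3, 4)

def Spec_solution (start : Int) (length : Int) (out : Int) : Prop := out = solution_alt start length
instance (start : Int) (length : Int) (out : Int) : Decidable (Spec_solution start length out) := by unfold Spec_solution; infer_instance

-- ===== CLAIM (what is proved, stated in full; the proofs are below) =====
def Claim_equal_solution : Prop := ∀ (start : Int) (length : Int), Dom_solution start length → Pre_solution start length → Spec_solution start length (solution start length)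

-- ===== LEMMAS AND PROOFS =====

-- bxor on Int constructors
theorem bxor_natCast_negSucc (m n : Nat) :
    PySem.Int.bxor (m : Int) (Int.negSucc n) = Int.negSucc (m ^^^ n) := by
  simp only [Int.negSucc_eq]
  unfold PySem.Int.bxor
  rw [if_pos (by positivity), if_neg (by omega)]
  rw [show (- -((n:Int) + 1) - 1) = (n:Int) from by ring,
    Int.toNat_natCast, Int.toNat_natCast]
  ring

theorem bxor_negSucc_natCast (m n : Nat) :
    PySem.Int.bxor (Int.negSucc m) (n : Int) = Int.negSucc (m ^^^ n) := by
  simp only [Int.negSucc_eq]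
  unfold PySem.Int.bxor
  rw [if_neg (by omega)]
  simp only [if_pos (show (0:Int) ≤ (n:Int) by positivity)]
  rw [show (- -((m:Int) + 1) - 1) = (m:Int) from by ring,
    Int.toNat_natCast, Int.toNat_natCast]
  ring

theorem bxor_negSucc_negSucc (m n : Nat) :
    PySem.Int.bxor (Int.negSucc m) (Int.negSucc n) = ((m ^^^ n : Nat) : Int) := by
  simp only [Int.negSucc_eq]
  unfold PySem.Int.bxor
  rw [if_neg (by omega), if_neg (by omega)]
  rw [show (- -((m:Int) + 1) - 1) = (m:Int) from by ring,
    show (- -((n:Int) + 1) - 1) = (n:Int) from by ring,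
    Int.toNat_natCast, Int.toNat_natCast]

theorem bxor_assoc (a b c : Int) :
    PySem.Int.bxor (PySem.Int.bxor a b) c = PySem.Int.bxor a (PySem.Int.bxor b c) := by
  cases a <;> cases b <;> cases c <;>
    simp [bxor_natCast_negSucc, bxor_negSucc_natCast, bxor_negSucc_negSucc,
      Nat.xor_assoc]

theorem zero_bxor (a : Int) : PySem.Int.bxor 0 a = a := by
  rw [PySem.Int.bxor_comm, PySem.Int.bxor_zero]

theorem bxor_cancel_left (a b : Int) : PySem.Int.bxor a (PySem.Int.bxor a b) = b := by
  rw [← bxor_assoc, PySem.Int.bxor_self, zero_bxor]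

theorem bxor_left_comm (a b c : Int) :
    PySem.Int.bxor a (PySem.Int.bxor b c) = PySem.Int.bxor b (PySem.Int.bxor a c) := by
  rw [← bxor_assoc, PySem.Int.bxor_comm a b, bxor_assoc]

-- even n ⊕ 1 = n + 1 (two's complement, all integers)
theorem bxor_one_of_even (n : Int) (h : n % 2 = 0) : PySem.Int.bxor n 1 = n + 1 := by
  cases n with
  | ofNat m =>
    simp only [Int.ofNat_eq_natCast] at h
    have hm : Even m := by
      rw [Nat.even_iff]
      omega
    have h1 : PySem.Int.bxor ((m : Int)) (((1:Nat) : Int)) = (((m ^^^ 1 : Nat)) : Int) :=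
      PySem.Int.bxor_natCast m 1
    simp only [Int.ofNat_eq_natCast, Nat.cast_one] at h1 ⊢
    rw [h1, Nat.xor_one_of_even hm]
    push_cast
    ring
  | negSucc m =>
    have hm : Odd m := by
      rw [Int.negSucc_eq] at h
      rw [Nat.odd_iff]
      omega
    have hm1 : 1 ≤ m := by
      rcases hm with ⟨k, hk⟩
      omega
    have h1 : (1 : Int) = ((1 : Nat) : Int) := rfl
    rw [h1, bxor_negSucc_natCast, Nat.xor_one_of_odd hm]
    rw [Int.negSucc_eq, Int.negSucc_eq]
    push_cast [hm1]
    ring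

-- the crux: A's helper is an exact prefix XOR of the sequence k-1, over ALL integers
theorem pyXor_succ (n : Int) : pyXor (n + 1) = PySem.Int.bxor (pyXor n) n := by
  have hmod : ∀ x : Int, PySem.Int.mod x 4 = x % 4 := by
    intro x
    show Int.fmod x 4 = x % 4
    rw [Int.fmod_eq_emod]
    norm_num
  have h4 : n % 4 = 0 ∨ n % 4 = 1 ∨ n % 4 = 2 ∨ n % 4 = 3 := by omega
  unfold pyXor
  simp only [hmod, add_sub_cancel_right]
  rcases h4 with h | h | h | h
  · -- n ≡ 0 [4]: A returns 0 at n (or n = 0), n at n+1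
    rw [if_neg (by omega : ¬ n + 1 = 0), if_pos h]
    by_cases hn : n = 0
    · subst hn; simp [PySem.Int.bxor]
    · rw [if_neg hn, if_neg (by omega), if_neg (by omega), if_neg (by omega),
        zero_bxor]
  · -- n ≡ 1 [4]: (n-1) ⊕ n = 1 for odd n
    rw [if_neg (by omega : ¬ n + 1 = 0), if_neg (by omega), if_pos h,
      if_neg (by omega : ¬ n = 0), if_pos (by omega : (n - 1) % 4 = 0)]
    have he : (n - 1) % 2 = 0 := by omega
    have h1 : PySem.Int.bxor (n - 1) 1 = n := by
      rw [bxor_one_of_even _ he]; ring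
    calc (1 : Int) = PySem.Int.bxor (n - 1) (PySem.Int.bxor (n - 1) 1) :=
          (bxor_cancel_left _ _).symm
      _ = PySem.Int.bxor (n - 1) n := by rw [h1]
  · -- n ≡ 2 [4]: 1 ⊕ n = n + 1 for even n
    rw [if_neg (by omega : ¬ n + 1 = 0), if_neg (by omega), if_neg (by omega), if_pos h,
      if_neg (by omega : ¬ n = 0), if_neg (by omega), if_pos (by omega : (n - 1) % 4 = 1),
      PySem.Int.bxor_comm, bxor_one_of_even n (by omega)]
  · -- n ≡ 3 [4]: n ⊕ n = 0 (n = -1 gives the n+1 = 0 branch)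
    by_cases hn : n = -1
    · subst hn
      decide
    · rw [if_neg (by omega : ¬ n + 1 = 0), if_neg (by omega), if_neg (by omega),
        if_neg (by omega), if_neg (by omega : ¬ n = 0), if_neg (by omega),
        if_neg (by omega), if_pos (by omega : (n - 1) % 4 = 2)]
      exact (PySem.Int.bxor_self n).symm

-- pyXor on even arguments is the bit [n % 4 = 2]
theorem pyXor_mod4_0 (n : Int) (h : n % 4 = 0) : pyXor n = 0 := by
  unfold pyXor
  by_cases hn : n = 0
  · rw [if_pos hn]
  · rw [if_neg hn]
    show (if PySem.Int.mod (n-1) 4 = 0 then n - 1 else _) = 0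
    rw [show PySem.Int.mod (n-1) 4 = (n-1) % 4 from by
        show Int.fmod _ _ = _; rw [Int.fmod_eq_emod]; norm_num]
    rw [if_neg (by omega), if_neg (by omega), if_neg (by omega)]

theorem pyXor_mod4_2 (n : Int) (h : n % 4 = 2) : pyXor n = 1 := by
  unfold pyXor
  rw [if_neg (by omega : ¬ n = 0)]
  show (if PySem.Int.mod (n-1) 4 = 0 then n - 1 else _) = 1
  rw [show PySem.Int.mod (n-1) 4 = (n-1) % 4 from by
      show Int.fmod _ _ = _; rw [Int.fmod_eq_emod]; norm_num]
  rw [if_neg (by omega), if_pos (by omega)]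

-- even-aligned, even-length range: the XOR is the parity of the number of pairs
theorem core_pairs (lo hi : Int) (hlo : lo % 2 = 0) (hhi : hi % 2 = 0) (hle : lo ≤ hi) :
    PySem.Int.band (PySem.Int.floordiv (hi - lo) 2) 1
      = PySem.Int.bxor (pyXor lo) (pyXor hi) := by
  rw [PySem.Int.band_one]
  rw [show PySem.Int.mod (PySem.Int.floordiv (hi - lo) 2) 2
        = ((hi - lo) / 2) % 2 from by
      show Int.fmod (Int.fdiv _ _) _ = _
      rw [Int.fdiv_eq_ediv, Int.fmod_eq_emod] <;> norm_num]
  have h4lo : lo % 4 = 0 ∨ lo % 4 = 2 := by omega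
  have h4hi : hi % 4 = 0 ∨ hi % 4 = 2 := by omega
  rcases h4lo with h1 | h1 <;> rcases h4hi with h2 | h2
  · rw [pyXor_mod4_0 lo h1, pyXor_mod4_0 hi h2,
      show ((hi - lo) / 2) % 2 = 0 from by omega]
    decide
  · rw [pyXor_mod4_0 lo h1, pyXor_mod4_2 hi h2,
      show ((hi - lo) / 2) % 2 = 1 from by omega]
    decide
  · rw [pyXor_mod4_2 lo h1, pyXor_mod4_0 hi h2,
      show ((hi - lo) / 2) % 2 = 1 from by omega]
    decide
  · rw [pyXor_mod4_2 lo h1, pyXor_mod4_2 hi h2,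
      show ((hi - lo) / 2) % 2 = 0 from by omega]
    decide

-- one row of B equals A's prefix-XOR difference
theorem rowStep_eq (t lo hi : Int) (h : lo < hi) :
    rowStep t lo hi = PySem.Int.bxor t (PySem.Int.bxor (pyXor lo) (pyXor hi)) := by
  have hband : ∀ x : Int, PySem.Int.band x 1 = x % 2 := by
    intro x
    rw [PySem.Int.band_one]
    show Int.fmod _ _ = _
    rw [Int.fmod_eq_emod]
    norm_num
  unfold rowStep rowStep2
  by_cases h1 : lo % 2 = 1
  · rw [if_pos (by rw [hband]; exact h1)]
    by_cases h2 : (hi - (lo + 1)) % 2 = 1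
    · rw [if_pos (by rw [hband]; omega)]
      rw [core_pairs (lo + 1) (hi - 1) (by omega) (by omega) (by omega)]
      rw [pyXor_succ lo, show hi = (hi - 1) + 1 from by ring, pyXor_succ (hi - 1)]
      simp only [add_sub_cancel_right]
      simp [PySem.Int.bxor_comm, bxor_left_comm, bxor_cancel_left]
    · rw [if_neg (by rw [hband]; omega)]
      rw [core_pairs (lo + 1) hi (by omega) (by omega) (by omega)]
      rw [pyXor_succ lo]
      simp [PySem.Int.bxor_comm, bxor_left_comm, bxor_cancel_left]
  · rw [if_neg (by rw [hband]; omega)]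
    by_cases h2 : (hi - lo) % 2 = 1
    · rw [if_pos (by rw [hband]; omega)]
      rw [core_pairs lo (hi - 1) (by omega) (by omega) (by omega)]
      rw [show hi = (hi - 1) + 1 from by ring, pyXor_succ (hi - 1)]
      simp only [add_sub_cancel_right]
      simp [PySem.Int.bxor_comm, bxor_left_comm, bxor_cancel_left]
    · rw [if_neg (by rw [hband]; omega)]
      rw [core_pairs lo hi (by omega) (by omega) (by omega)]

-- outer loop: A's while from iteration k equals B's fold over range(k, length)
theorem loop_eq (s L : Int) (hL : 0 ≤ L) : ∀ (fuel k : Nat), L.toNat ≤ k + fuel → ∀ t : Int,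
    solutionLoop fuel s L (s + (k : Int) * L) t (k : Int)
      = (PySem.List.pyRange (k : Int) L 1).foldl
          (fun total i => rowStep total (s + i * L) (s + i * L + L - i)) t := by
  intro fuel
  induction fuel with
  | zero =>
    intro k hk t
    have hkL : L ≤ (k : Int) := by omega
    rw [PySem.List.pyRange_one_eq_nil hkL]
    rfl
  | succ fuel ih =>
    intro k hk t
    by_cases hklt : (k : Int) < L
    · -- one more iteration on both sides
      have hcond : s + (k : Int) * L ≤ s + L ^ 2 - 1 := by
        have h1 : (k : Int) * L ≤ (L - 1) * L := by
          apply mul_le_mul_of_nonneg_right _ hL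
          omega
        nlinarith
      rw [show solutionLoop (fuel + 1) s L (s + (k : Int) * L) t (k : Int)
            = if s + (k : Int) * L ≤ s + L ^ 2 - 1 then
                solutionLoop fuel s L (s + (k : Int) * L + L)
                  (PySem.Int.bxor t (PySem.Int.bxor (pyXor (s + (k : Int) * L))
                    (pyXor (s + (k : Int) * L + L - (k : Int))))) ((k : Int) + 1)
              else t from rfl,
        if_pos hcond]
      rw [PySem.List.pyRange_one_cons hklt, List.foldl_cons]
      rw [← rowStep_eq t (s + (k : Int) * L) (s + (k : Int) * L + L - (k : Int)) (by omega)]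
      have hnext1 : s + (k : Int) * L + L = s + ((k + 1 : Nat) : Int) * L := by
        push_cast; ring
      have hnext2 : (k : Int) + 1 = ((k + 1 : Nat) : Int) := by push_cast; ring
      rw [hnext1, hnext2, ih (k + 1) (by omega)]
    · -- both sides are done
      have hcond : ¬ (s + (k : Int) * L ≤ s + L ^ 2 - 1) := by
        have h1 : L * L ≤ (k : Int) * L := by
          apply mul_le_mul_of_nonneg_right _ hL
          omega
        nlinarith
      rw [show solutionLoop (fuel + 1) s L (s + (k : Int) * L) t (k : Int)
            = if s + (k : Int) * L ≤ s + L ^ 2 - 1 then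
                solutionLoop fuel s L (s + (k : Int) * L + L)
                  (PySem.Int.bxor t (PySem.Int.bxor (pyXor (s + (k : Int) * L))
                    (pyXor (s + (k : Int) * L + L - (k : Int))))) ((k : Int) + 1)
              else t from rfl,
        if_neg hcond]
      rw [PySem.List.pyRange_one_eq_nil (by omega : L ≤ (k : Int))]
      rfl

-- ===== VERDICT (by name: the statement is the Claim_ definition above) =====
theorem solution_spec : Claim_equal_solution := by
  intro start length _ hpre
  unfold Spec_solution solution solution_alt
  have := loop_eq start length hpre (length.toNat + 1) 0 (by omega) 0
  simpa using this
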